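-- pv_equiv track=rewrite | github.com/DUT-LiuYang/biomedical-event-trigger-extraction | lib/ExampleReader.py | get_average_attention
-- ===== SOURCE A (Python) =====
-- def get_average_attention(id_label=[], interaction_e2=[]):
--     attention_label = []
--     num = 0
--     for i in range(len(id_label)):
--         attention_label.append(0)
--         for j in range(len(interaction_e2)):
--             if interaction_e2[j] == id_label[i][2:]:
--                 num += 1
--                 attention_label[i] = 1
--                 break
--     return attention_label, num
-- ===== SOURCE B (Python) =====
-- def get_average_attention(id_label=[], interaction_e2=[]):
--     # Index id_label once by suffix, then scan interaction_e2 once (A rescans it per label).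
--     buckets = {}
--     for pair in [(s[2:], i) for i, s in enumerate(id_label)]:
--         buckets.setdefault(pair[0], []).append(pair[1])
--     attention_label = [0] * len(id_label)
--     for s in interaction_e2:
--         for i in buckets.get(s, []):
--             attention_label[i] = 1
--     return attention_label, sum(attention_label)
-- ===== Notes on version B (the rewrite author's own statement) =====
-- stated objective: faster
-- what changed: B inverts the loop nesting: it builds a dict from each suffix id_label[i][2:] to its list of indices in one pass, then scans interaction_e2 once marking all bucketed indices, with num recovered as sum(attention_label), instead of A's rescan of interaction_e2 for every id_label entry.
import Mathlib
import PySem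

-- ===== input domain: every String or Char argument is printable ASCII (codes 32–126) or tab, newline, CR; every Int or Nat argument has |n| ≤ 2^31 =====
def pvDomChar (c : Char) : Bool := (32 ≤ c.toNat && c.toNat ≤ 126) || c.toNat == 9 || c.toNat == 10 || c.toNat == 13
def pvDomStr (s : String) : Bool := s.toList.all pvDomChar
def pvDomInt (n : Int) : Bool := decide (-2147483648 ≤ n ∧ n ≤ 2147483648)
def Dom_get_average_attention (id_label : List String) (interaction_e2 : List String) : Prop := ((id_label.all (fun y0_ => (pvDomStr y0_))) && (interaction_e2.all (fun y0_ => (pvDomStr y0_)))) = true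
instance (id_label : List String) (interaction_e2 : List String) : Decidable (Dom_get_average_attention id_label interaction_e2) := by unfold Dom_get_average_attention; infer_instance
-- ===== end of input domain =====

-- B inverts A's loops: it indexes id_label by suffix once and scans interaction_e2 once,
-- instead of rescanning interaction_e2 for every id_label entry. Return values are equal.

-- ===== PORT A =====
-- s[2:]
def pvSuf (s : String) : String := PySem.Str.slice s (some 2) none

-- inner 'for j in range(len(interaction_e2)): if interaction_e2[j] == t: …; break' — scan until first match
def pvAInner (e2 : List String) (t : String) : Bool :=
  match e2 with
  | [] => false
  | x :: rest => if x = t then true else pvAInner rest t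

-- outer 'for i in range(len(id_label))', state (attention_label, num); append 0, then set slot i on a hit
def pvALoop (id_label e2 : List String) (i : Nat) (lbl : List Int) (num : Int) : List Int × Int :=
  if h : i < id_label.length then
    let lbl' := lbl ++ [0]
    if pvAInner e2 (pvSuf id_label[i]) then
      pvALoop id_label e2 (i+1) (lbl'.set i 1) (num+1)
    else
      pvALoop id_label e2 (i+1) lbl' num
  else (lbl, num)
  termination_by id_label.length - i

def get_average_attention (id_label : List String) (interaction_e2 : List String) : List Int × Int :=
  pvALoop id_label interaction_e2 0 [] 0

-- ===== PORT B =====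
-- buckets.setdefault(suffix, []).append(i)  ≡  modify suffix [] (· ++ [i]) (same values, same key order)
def pvBuckets (id_label : List String) : PySem.Dict String (List Int) :=
  ((PySem.List.enumerate id_label 0).map (fun p => (pvSuf p.2, p.1))).foldl
    (fun d q => d.modify q.1 [] (· ++ [q.2])) PySem.Dict.empty

-- 'for i in buckets.get(s, []): attention_label[i] = 1' (indices come from enumerate, hence ≥ 0: .toNat is exact)
def pvMark (lbl : List Int) (idxs : List Int) : List Int :=
  idxs.foldl (fun l i => l.set i.toNat 1) lbl

def get_average_attention_alt (id_label : List String) (interaction_e2 : List String) : List Int × Int :=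
  let buckets := pvBuckets id_label
  let marks := interaction_e2.foldl (fun l s => pvMark l (buckets.getD s [])) (List.replicate id_label.length 0)
  (marks, marks.sum)

-- ===== PRECONDITION & SPEC =====
def Spec_get_average_attention (id_label : List String) (interaction_e2 : List String) (out : List Int × Int) : Prop := out = get_average_attention_alt id_label interaction_e2
instance (id_label : List String) (interaction_e2 : List String) (out : List Int × Int) : Decidable (Spec_get_average_attention id_label interaction_e2 out) := by unfold Spec_get_average_attention; infer_instance

-- ===== CLAIM (what is proved, stated in full; the proofs are below) =====
def Claim_equal_get_average_attention : Prop := ∀ (id_label : List String) (interaction_e2 : List String), Dom_get_average_attention id_label interaction_e2 → Spec_get_average_attention id_label interaction_e2 (get_average_attention id_label interaction_e2)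

-- ===== LEMMAS AND PROOFS =====

-- common characterisation: entry for s is 1 iff s[2:] occurs in seen
def pvFlag (seen : List String) (s : String) : Int := if pvSuf s ∈ seen then 1 else 0

lemma pvAInner_iff (e2 : List String) (t : String) : pvAInner e2 t = true ↔ t ∈ e2 := by
  induction e2 with
  | nil => simp [pvAInner]
  | cons x rest ih =>
    by_cases h : x = t
    · simp [pvAInner, h]
    · simp only [pvAInner, if_neg h, ih, List.mem_cons]
      constructor
      · exact Or.inr
      · rintro (hx | hx)
        · exact absurd hx.symm h
        · exact hx

lemma pvALoop_eq (idl e2 : List String) (i : Nat) (lbl : List Int) (num : Int)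
    (h : lbl.length = i) :
    pvALoop idl e2 i lbl num =
      (lbl ++ (idl.drop i).map (pvFlag e2), num + ((idl.drop i).map (pvFlag e2)).sum) := by
  by_cases hi : i < idl.length
  · rw [pvALoop]
    have hdrop : idl.drop i = idl[i] :: idl.drop (i+1) := List.drop_eq_getElem_cons hi
    by_cases hm : pvAInner e2 (pvSuf idl[i]) = true
    · have hmem : pvSuf idl[i] ∈ e2 := (pvAInner_iff e2 _).mp hm
      simp only [hi, dif_pos, hm, if_pos]
      rw [pvALoop_eq idl e2 (i+1) _ _ (by simp [h])]
      have hset : (lbl ++ [(0:Int)]).set i 1 = lbl ++ [1] := by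
        subst h; simp [List.set_append_right]
      have hmap : (idl.drop i).map (pvFlag e2) = 1 :: (idl.drop (i+1)).map (pvFlag e2) := by
        rw [hdrop, List.map_cons]; simp only [pvFlag, if_pos hmem]
      rw [hset, hmap]
      refine Prod.ext ?_ ?_
      · simp [List.append_assoc]
      · simp only [List.sum_cons]; ring
    · have hmem : pvSuf idl[i] ∉ e2 := by
        intro hc; exact hm ((pvAInner_iff e2 _).mpr hc)
      simp only [hi, dif_pos, hm, if_neg, Bool.not_eq_true]
      rw [pvALoop_eq idl e2 (i+1) _ _ (by simp [h])]
      have hmap : (idl.drop i).map (pvFlag e2) = 0 :: (idl.drop (i+1)).map (pvFlag e2) := by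
        rw [hdrop, List.map_cons]; simp only [pvFlag, if_neg hmem]
      rw [hmap]
      refine Prod.ext ?_ ?_
      · simp [List.append_assoc]
      · simp only [List.sum_cons]; ring
  · rw [pvALoop]
    have hdrop : idl.drop i = [] := List.drop_eq_nil_of_le (by omega)
    simp [hi, hdrop]
  termination_by idl.length - i

lemma pvA_char (idl e2 : List String) :
    get_average_attention idl e2 = (idl.map (pvFlag e2), (idl.map (pvFlag e2)).sum) := by
  unfold get_average_attention
  rw [pvALoop_eq idl e2 0 [] 0 rfl]
  simp

lemma pvBuckets_getD (idl : List String) (c : String) :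
    (pvBuckets idl).getD c [] =
      (((PySem.List.enumerate idl 0).map (fun p => (pvSuf p.2, p.1))).filter
        (fun q => q.1 == c)).map (·.2) := by
  unfold pvBuckets
  rw [PySem.Dict.getD_foldl_modify_append]
  simp

lemma pvBucket_mem (idl : List String) (c : String) (k : Nat) :
    ((k : Int) ∈ (pvBuckets idl).getD c []) ↔ (k < idl.length ∧ pvSuf idl[k]! = c) := by
  rw [pvBuckets_getD]
  simp only [List.mem_map, List.mem_filter, beq_iff_eq]
  constructor
  · rintro ⟨q, ⟨⟨p, hp, rfl⟩, hc⟩, hv⟩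
    obtain ⟨m, hm, rfl⟩ := (PySem.List.mem_enumerate_iff _ _ _).mp hp
    simp only at hv hc
    have hmk : m = k := by omega
    subst hmk
    refine ⟨hm, ?_⟩
    rw [getElem!_pos idl m hm]
    exact hc
  · rintro ⟨hk, hc⟩
    rw [getElem!_pos idl k hk] at hc
    refine ⟨(pvSuf idl[k], (k : Int)), ⟨⟨((k : Int), idl[k]), ?_, rfl⟩, hc⟩, rfl⟩
    exact (PySem.List.mem_enumerate_iff _ _ _).mpr ⟨k, hk, by simp⟩

lemma pvBucket_nonneg (idl : List String) (c : String) :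
    ∀ i ∈ (pvBuckets idl).getD c [], 0 ≤ i := by
  intro i hi
  rw [pvBuckets_getD] at hi
  simp only [List.mem_map, List.mem_filter] at hi
  obtain ⟨q, ⟨⟨p, hp, rfl⟩, _⟩, hv⟩ := hi
  obtain ⟨m, hm, rfl⟩ := (PySem.List.mem_enumerate_iff _ _ _).mp hp
  simp only at hv
  omega

lemma pvMark_length (idxs : List Int) (lbl : List Int) :
    (pvMark lbl idxs).length = lbl.length := by
  induction idxs generalizing lbl with
  | nil => rfl
  | cons a rest ih =>
    rw [show pvMark lbl (a :: rest) = pvMark (lbl.set a.toNat 1) rest from rfl,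
        ih (lbl.set a.toNat 1), List.length_set]

lemma pvMark_getElem? (idxs : List Int) (lbl : List Int) (k : Nat) (hk : k < lbl.length)
    (hnn : ∀ i ∈ idxs, 0 ≤ i) :
    (pvMark lbl idxs)[k]? = some (if (k : Int) ∈ idxs then 1 else lbl[k]) := by
  induction idxs generalizing lbl with
  | nil => simp [pvMark, List.getElem?_eq_getElem hk]
  | cons a rest ih =>
    have ha : 0 ≤ a := hnn a (by simp)
    rw [show pvMark lbl (a :: rest) = pvMark (lbl.set a.toNat 1) rest from rfl,
        ih (lbl.set a.toNat 1) (by simpa using hk) (fun i hi => hnn i (by simp [hi]))]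
    by_cases hr : (k : Int) ∈ rest
    · simp [hr]
    · by_cases hak : a = (k : Int)
      · have hta : a.toNat = k := by omega
        simp [hr, hak]
      · have hta : a.toNat ≠ k := by omega
        simp [hr, hta, Ne.symm hak]

-- one step of B's outer loop: marking bucket(s0) adds s0 to the 'seen' set
lemma pvMark_step (idl : List String) (seen : List String) (s0 : String) :
    pvMark (idl.map (pvFlag seen)) ((pvBuckets idl).getD s0 []) =
      idl.map (pvFlag (seen ++ [s0])) := by
  apply List.ext_getElem
  · rw [pvMark_length]; simp
  · intro k hk hk'
    have hkl : k < idl.length := by simpa using hk'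
    have hq := pvMark_getElem? ((pvBuckets idl).getD s0 []) (idl.map (pvFlag seen)) k
      (by simpa using hkl) (pvBucket_nonneg idl s0)
    rw [List.getElem?_eq_getElem hk] at hq
    simp only [Option.some.injEq] at hq
    rw [hq]
    have hmem := pvBucket_mem idl s0 k
    by_cases hb : (k : Int) ∈ (pvBuckets idl).getD s0 []
    · have hc : pvSuf idl[k]! = s0 := (hmem.mp hb).2
      rw [getElem!_pos idl k hkl] at hc
      simp [hb, pvFlag, hc]
    · have hc : ¬ pvSuf idl[k]! = s0 := by
        intro h; exact hb (hmem.mpr ⟨hkl, h⟩)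
      rw [getElem!_pos idl k hkl] at hc
      simp only [hb, if_false, List.getElem_map]
      by_cases hs : pvSuf idl[k] ∈ seen <;> simp [pvFlag, hs, hc]

lemma pvMark_fold (idl : List String) (seen e2 : List String) :
    e2.foldl (fun l s => pvMark l ((pvBuckets idl).getD s [])) (idl.map (pvFlag seen)) =
      idl.map (pvFlag (seen ++ e2)) := by
  induction e2 generalizing seen with
  | nil => simp
  | cons s0 rest ih =>
    rw [List.foldl_cons, pvMark_step idl seen s0, ih (seen ++ [s0])]
    simp

lemma pvB_char (idl e2 : List String) :
    get_average_attention_alt idl e2 = (idl.map (pvFlag e2), (idl.map (pvFlag e2)).sum) := by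
  unfold get_average_attention_alt
  have hrep : idl.map (pvFlag ([] : List String)) = List.replicate idl.length (0 : Int) := by
    rw [List.eq_replicate_iff]
    constructor
    · simp
    · intro b hb
      obtain ⟨s, _, rfl⟩ := List.mem_map.mp hb
      simp [pvFlag]
  simp only [← hrep, pvMark_fold idl [] e2, List.nil_append]

-- ===== VERDICT (by name: the statement is the Claim_ definition above) =====
theorem get_average_attention_spec : Claim_equal_get_average_attention := by
  intro idl e2 _
  unfold Spec_get_average_attention
  rw [pvA_char, pvB_char]
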